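-- pv_equiv track=rewrite | github.com/AadyKafle/Data-Engineering | Daily_Task(21-JAN)/string_problem.py | long_words_alternate_case
-- ===== SOURCE A (Python) =====
-- def long_words_alternate_case(s):
--     result = []
--     for word in s.split():
--         if len(word) > 5:
--             new_word = ""
--             for i, ch in enumerate(word):
--                 if i % 2 == 0:
--                     new_word += ch.upper()
--                 else:
--                     new_word += ch.lower()
--             result.append(new_word)
--     return result
-- ===== SOURCE B (Python) =====
-- def long_words_alternate_case(s):
--     def fix(word):
--         parts = []
--         n = len(word)
--         i = 0
--         while i < n:
--             parts.append(word[i].upper())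
--             if i + 1 < n:
--                 parts.append(word[i + 1].lower())
--             i += 2
--         return ''.join(parts)
--     return [fix(w) for w in s.split() if len(w) > 5]
-- ===== Notes on version B (the rewrite author's own statement) =====
-- stated objective: simpler
-- what changed: The per-character enumerate loop with an index-parity test is replaced by a cursor loop that consumes two characters per step (uppercase first, lowercase second of each pair) and joins the pieces, and the outer accumulator loop by a list comprehension; no parity computation remains.
import Mathlib
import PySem

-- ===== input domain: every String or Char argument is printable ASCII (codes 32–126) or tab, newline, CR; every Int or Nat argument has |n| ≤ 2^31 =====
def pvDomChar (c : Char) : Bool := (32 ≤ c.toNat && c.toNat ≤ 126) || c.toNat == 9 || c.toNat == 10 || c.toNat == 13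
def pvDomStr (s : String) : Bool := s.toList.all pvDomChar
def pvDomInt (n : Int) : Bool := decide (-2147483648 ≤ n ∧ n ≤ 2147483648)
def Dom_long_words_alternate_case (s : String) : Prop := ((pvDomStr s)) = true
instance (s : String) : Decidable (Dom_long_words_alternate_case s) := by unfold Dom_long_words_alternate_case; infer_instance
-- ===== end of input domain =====

-- B replaces A's per-character enumerate/parity loop by a cursor loop that emits two
-- characters per step, and the outer accumulator loop by a comprehension (objective: simpler).

-- ===== PORT A =====
-- inner loop of A: 'for i, ch in enumerate(word): new_word += ch.upper()/ch.lower()'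
def altA (w : List Char) : List Char :=
  (PySem.List.enumerate w 0).foldl
    (fun acc p =>
      acc ++ [if PySem.Int.mod p.1 2 = 0 then PySem.Chars.upperChar p.2
              else PySem.Chars.lowerChar p.2]) []

def long_words_alternate_case (s : String) : List String :=
  (PySem.Str.split₀ s).foldl
    (fun result word =>
      if PySem.Str.len word > 5 then result ++ [String.ofList (altA word.toList)] else result) []

-- ===== PORT B =====
-- Source B's while loop: 'while i < n: parts.append(word[i].upper()); if i+1 < n:
-- parts.append(word[i+1].lower()); i += 2'.  word[i] / word[i+1] are in range by the
-- loop guards, so the default of pyGetD is never read.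
def fixLoop (w : List Char) (n i : Nat) (parts : List (List Char)) : List (List Char) :=
  if i < n then
    fixLoop w n (i + 2)
      ((parts ++ [[PySem.Chars.upperChar (PySem.List.pyGetD w (i : Int) ' ')]]) ++
        (if i + 1 < n then [[PySem.Chars.lowerChar (PySem.List.pyGetD w ((i : Int) + 1) ' ')]]
         else []))
  else parts
termination_by n - i

def long_words_alternate_case_alt (s : String) : List String :=
  ((PySem.Str.split₀ s).filter (fun w => decide (PySem.Str.len w > 5))).map
    (fun w => String.ofList (PySem.Chars.join [] (fixLoop w.toList w.toList.length 0 [])))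

-- ===== PRECONDITION & SPEC =====
def Spec_long_words_alternate_case (s : String) (out : List String) : Prop := out = long_words_alternate_case_alt s
instance (s : String) (out : List String) : Decidable (Spec_long_words_alternate_case s out) := by unfold Spec_long_words_alternate_case; infer_instance

-- ===== CLAIM (what is proved, stated in full; the proofs are below) =====
def Claim_equal_long_words_alternate_case : Prop := ∀ (s : String), Dom_long_words_alternate_case s → Spec_long_words_alternate_case s (long_words_alternate_case s)

-- ===== LEMMAS AND PROOFS =====

-- proof-side common form: the alternating transform, two characters at a time
def fixB : List Char → List Char
  | [] => []
  | [c] => [PySem.Chars.upperChar c]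
  | c :: d :: r => PySem.Chars.upperChar c :: PySem.Chars.lowerChar d :: fixB r

-- A's parity-indexed transform equals fixB, for any even start index.
theorem enum_map_eq_fixB (w : List Char) : ∀ (i : Int), PySem.Int.mod i 2 = 0 →
    (PySem.List.enumerate w i).map
      (fun p => if PySem.Int.mod p.1 2 = 0 then PySem.Chars.upperChar p.2
                else PySem.Chars.lowerChar p.2) = fixB w := by
  induction w using fixB.induct with
  | case1 =>
      intro i _
      simp [PySem.List.enumerate_nil, fixB]
  | case2 c =>
      intro i hi
      simp only [PySem.List.enumerate_cons, PySem.List.enumerate_nil, List.map_cons,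
        List.map_nil, fixB]
      rw [if_pos hi]
  | case3 c d r ih =>
      intro i hi
      have h1 : PySem.Int.mod (i + 1) 2 ≠ 0 := by
        simp [PySem.Int.mod, Int.fmod_eq_emod] at *; omega
      have h2 : PySem.Int.mod (i + 1 + 1) 2 = 0 := by
        simp [PySem.Int.mod, Int.fmod_eq_emod] at *; omega
      simp only [PySem.List.enumerate_cons, List.map_cons, fixB]
      rw [if_pos hi, if_neg h1, ih _ h2]

theorem altA_eq_fixB (w : List Char) : altA w = fixB w := by
  unfold altA
  rw [PySem.List.foldl_append_singleton_eq_map]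
  simpa using enum_map_eq_fixB w 0 rfl

-- ''.join(parts) with empty separator is concatenation
theorem join_nil_eq_flatten (xss : List (List Char)) :
    PySem.Chars.join [] xss = xss.flatten := by
  induction xss with
  | nil => simp [PySem.Chars.join_nil]
  | cons a r ih =>
      cases r with
      | nil => simp [PySem.Chars.join_singleton]
      | cons b t =>
          rw [PySem.Chars.join_cons_cons]
          simp only [List.flatten_cons] at ih ⊢
          simp [ih]

-- loop invariant for B's cursor loop
theorem fixLoop_spec (w : List Char) (n : Nat) (hn : n = w.length) (i : Nat)
    (parts : List (List Char)) :
    (fixLoop w n i parts).flatten = parts.flatten ++ fixB (w.drop i) := by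
  induction i, parts using fixLoop.induct w n with
  | case1 i parts hlt ih =>
      simp only [dite_eq_ite] at ih
      rw [fixLoop, if_pos hlt, ih]
      subst hn
      have hget : PySem.List.pyGetD w (i : Int) ' ' = w[i]'hlt := by
        rw [PySem.List.pyGetD_natCast]
        exact List.getD_eq_getElem w ' ' hlt
      by_cases h1 : i + 1 < w.length
      · have hget1 : PySem.List.pyGetD w ((i : Int) + 1) ' ' = w[i+1]'h1 := by
          have : ((i : Int) + 1) = ((i + 1 : Nat) : Int) := by push_cast; ring
          rw [this, PySem.List.pyGetD_natCast]
          exact List.getD_eq_getElem w ' ' h1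
        rw [if_pos h1, List.drop_eq_getElem_cons hlt, List.drop_eq_getElem_cons h1]
        simp [fixB, hget, hget1]
      · have hlen : w.length = i + 1 := by omega
        have hdrop2 : w.drop (i + 2) = [] := List.drop_eq_nil_of_le (by omega)
        rw [if_neg h1, List.drop_eq_getElem_cons hlt]
        have : w.drop (i + 1) = [] := List.drop_eq_nil_of_le (by omega)
        simp [fixB, this, hdrop2, hget]
  | case2 i parts hge =>
      subst hn
      rw [fixLoop, if_neg hge]
      have : w.drop i = [] := List.drop_eq_nil_of_le (by omega)
      simp [this, fixB]

theorem loop_join (w : List Char) :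
    PySem.Chars.join [] (fixLoop w w.length 0 []) = fixB w := by
  rw [join_nil_eq_flatten, fixLoop_spec w w.length rfl 0 []]
  simp

-- ===== VERDICT (by name: the statement is the Claim_ definition above) =====
theorem long_words_alternate_case_spec : Claim_equal_long_words_alternate_case := by
  intro s _
  unfold Spec_long_words_alternate_case long_words_alternate_case long_words_alternate_case_alt
  rw [PySem.List.foldl_append_ite (fun w => PySem.Str.len w > 5)
      (fun word => String.ofList (altA word.toList))]
  simp only [List.nil_append]
  refine List.map_congr_left (fun w _ => ?_)
  rw [altA_eq_fixB, loop_join]
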